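-- pv_equiv track=rewrite | github.com/rmig22/ProiectQR | main.py | rearanjare_cod
-- ===== SOURCE A (Python) =====
-- def rearanjare_cod(string_cod, versiune):
--
--     #facem rearanjarea pentru fiecare tip de varianta
--     if versiune == 1 or versiune == 2:
--         return string_cod
--
--     elif versiune == 3:
--         cod = [string_cod[i:i+8] for i in range(0, len(string_cod), 8)]
--         cod_nou = [[cod[0]], [cod[1]]]
--
--         for i in range(2, len(cod)):
--             cod_nou[i%2].append(cod[i])
--
--
--         string_cod_nou = "".join("".join(x for x in linie) for linie in cod_nou)
--         return string_cod_nou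
--
--     elif versiune == 4 or versiune == 6:
--         cod = [string_cod[i:i + 8] for i in range(0, len(string_cod), 8)]
--         cod_nou = [[cod[0]], [cod[1]], [cod[2]], [cod[3]]]
--
--         for i in range(4, len(cod)):
--             cod_nou[i % 4].append(cod[i])
--
--         string_cod_nou = "".join("".join(x for x in linie) for linie in cod_nou)
--         return string_cod_nou
--     else:
--         cod = [string_cod[i:i + 8] for i in range(0, len(string_cod), 8)]
--         cod_nou = [[cod[0]], [cod[1]], [cod[2]], [cod[3]]]
--
--         for i in range(4, len(cod)):
--             if i == 44:
--                 cod_nou[2].append(cod[i])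
--             elif i == 45:
--                 cod_nou[3].append(cod[i])
--             else:
--                 cod_nou[i % 4].append(cod[i])
--
--         string_cod_nou = "".join("".join(x for x in linie) for linie in cod_nou)
--         return string_cod_nou
-- ===== SOURCE B (Python) =====
-- def rearanjare_cod(string_cod, versiune):
--     # versions 1/2: unchanged
--     if versiune == 1 or versiune == 2:
--         return string_cod
--     cod = [string_cod[i:i + 8] for i in range(0, len(string_cod), 8)]
--     k = 2 if versiune == 3 else 4
--     if versiune == 3 or versiune == 4 or versiune == 6:
--         dest = lambda i: i % k
--     else:
--         # chunks 44 and 45 are routed to rows 2 and 3 instead of 0 and 1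
--         dest = lambda i: 2 if i == 44 else 3 if i == 45 else i % 4
--     # row r is its seed chunk cod[r] followed by every later chunk destined for it
--     return "".join(cod[r] + "".join(cod[i] for i in range(k, len(cod)) if dest(i) == r)
--                    for r in range(k))
-- ===== Notes on version B (the rewrite author's own statement) =====
-- stated objective: simpler
-- what changed: Replaces the mutable seeded bucket lists filled by one append loop (with the i==44/45 special branches inside the loop body) by a per-row join: for each destination row r, emit its seed chunk followed by the later chunks a destination function routes to r; the 44/45 rerouting becomes two cases of that function.
import Mathlib
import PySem

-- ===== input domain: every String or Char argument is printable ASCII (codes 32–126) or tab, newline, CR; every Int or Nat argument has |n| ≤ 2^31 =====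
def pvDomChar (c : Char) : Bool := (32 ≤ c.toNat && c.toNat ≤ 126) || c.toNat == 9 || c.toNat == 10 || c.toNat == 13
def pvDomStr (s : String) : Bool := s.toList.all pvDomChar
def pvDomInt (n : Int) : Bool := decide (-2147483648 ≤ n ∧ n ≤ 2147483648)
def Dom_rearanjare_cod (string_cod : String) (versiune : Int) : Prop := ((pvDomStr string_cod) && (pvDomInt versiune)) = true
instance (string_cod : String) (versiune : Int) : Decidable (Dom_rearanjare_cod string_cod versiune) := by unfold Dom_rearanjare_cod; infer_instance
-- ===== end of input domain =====

-- B replaces A's seeded bucket lists filled by an append loop with a single join grouped by a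
-- destination-row function (simpler decomposition; same complexity).

-- ===== PORT A =====
def rearanjare_cod (string_cod : String) (versiune : Int) : String :=
  if versiune = 1 ∨ versiune = 2 then string_cod
  else if versiune = 3 then
    let s := string_cod.toList
    let cod := (PySem.List.pyRange 0 (s.length : Int) 8).map
      (fun i => PySem.List.slice s (some i) (some (i + 8)))
    -- cod_nou = [[cod[0]], [cod[1]]]  (cod[0]/cod[1] raise IndexError when missing: excluded by Pre_)
    let codNou0 : List (List (List Char)) :=
      [[PySem.List.pyGetD cod 0 []], [PySem.List.pyGetD cod 1 []]]
    let codNou := (PySem.List.pyRange 2 (cod.length : Int) 1).foldl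
      (fun B i => B.modify (PySem.Int.mod i 2).toNat
        (fun linie => linie ++ [PySem.List.pyGetD cod i []])) codNou0
    String.ofList (codNou.map List.flatten).flatten
  else if versiune = 4 ∨ versiune = 6 then
    let s := string_cod.toList
    let cod := (PySem.List.pyRange 0 (s.length : Int) 8).map
      (fun i => PySem.List.slice s (some i) (some (i + 8)))
    let codNou0 : List (List (List Char)) :=
      [[PySem.List.pyGetD cod 0 []], [PySem.List.pyGetD cod 1 []],
       [PySem.List.pyGetD cod 2 []], [PySem.List.pyGetD cod 3 []]]
    let codNou := (PySem.List.pyRange 4 (cod.length : Int) 1).foldl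
      (fun B i => B.modify (PySem.Int.mod i 4).toNat
        (fun linie => linie ++ [PySem.List.pyGetD cod i []])) codNou0
    String.ofList (codNou.map List.flatten).flatten
  else
    let s := string_cod.toList
    let cod := (PySem.List.pyRange 0 (s.length : Int) 8).map
      (fun i => PySem.List.slice s (some i) (some (i + 8)))
    let codNou0 : List (List (List Char)) :=
      [[PySem.List.pyGetD cod 0 []], [PySem.List.pyGetD cod 1 []],
       [PySem.List.pyGetD cod 2 []], [PySem.List.pyGetD cod 3 []]]
    let codNou := (PySem.List.pyRange 4 (cod.length : Int) 1).foldl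
      (fun B i =>
        if i = 44 then B.modify 2 (fun linie => linie ++ [PySem.List.pyGetD cod i []])
        else if i = 45 then B.modify 3 (fun linie => linie ++ [PySem.List.pyGetD cod i []])
        else B.modify (PySem.Int.mod i 4).toNat
          (fun linie => linie ++ [PySem.List.pyGetD cod i []])) codNou0
    String.ofList (codNou.map List.flatten).flatten

-- ===== PORT B =====
def rearanjare_cod_alt (string_cod : String) (versiune : Int) : String :=
  if versiune = 1 ∨ versiune = 2 then string_cod
  else
    let s := string_cod.toList
    let cod := (PySem.List.pyRange 0 (s.length : Int) 8).map
      (fun i => PySem.List.slice s (some i) (some (i + 8)))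
    let k : Int := if versiune = 3 then 2 else 4
    let dest : Int → Int :=
      if versiune = 3 ∨ versiune = 4 ∨ versiune = 6 then
        fun i => PySem.Int.mod i k
      else
        fun i => if i = 44 then 2 else if i = 45 then 3 else PySem.Int.mod i 4
    String.ofList
      ((PySem.List.pyRange 0 k 1).map (fun r =>
        PySem.List.pyGetD cod r [] ++
          (((PySem.List.pyRange k (cod.length : Int) 1).filter (fun i => decide (dest i = r))).map
            (fun i => PySem.List.pyGetD cod i [])).flatten)).flatten

-- ===== PRECONDITION & SPEC =====
-- Pre_ excludes exactly the inputs where A raises IndexError: versiune = 3 needs at least 2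
-- 8-char chunks (len ≥ 9); any versiune other than 1,2,3 needs at least 4 chunks (len ≥ 25).
def Pre_rearanjare_cod (string_cod : String) (versiune : Int) : Prop :=
  versiune = 1 ∨ versiune = 2 ∨ (versiune = 3 ∧ 9 ≤ string_cod.toList.length) ∨
    (versiune ≠ 1 ∧ versiune ≠ 2 ∧ versiune ≠ 3 ∧ 25 ≤ string_cod.toList.length)
instance (string_cod : String) (versiune : Int) : Decidable (Pre_rearanjare_cod string_cod versiune) := by unfold Pre_rearanjare_cod; infer_instance
def pvWitness_rearanjare_cod : String × Int := ("abcdefghi", 3)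

def Spec_rearanjare_cod (string_cod : String) (versiune : Int) (out : String) : Prop := out = rearanjare_cod_alt string_cod versiune
instance (string_cod : String) (versiune : Int) (out : String) : Decidable (Spec_rearanjare_cod string_cod versiune out) := by unfold Spec_rearanjare_cod; infer_instance

-- ===== CLAIM (what is proved, stated in full; the proofs are below) =====
def Claim_equal_rearanjare_cod : Prop := ∀ (string_cod : String) (versiune : Int), Dom_rearanjare_cod string_cod versiune → Pre_rearanjare_cod string_cod versiune → Spec_rearanjare_cod string_cod versiune (rearanjare_cod string_cod versiune)
-- ===== LEMMAS AND PROOFS =====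

lemma length_foldl_modify {α : Type} (L : List Int) (f : Int → Nat) (g : Int → α)
    (B : List (List α)) :
    (L.foldl (fun B i => B.modify (f i) (fun l => l ++ [g i])) B).length = B.length := by
  induction L generalizing B with
  | nil => rfl
  | cons x L ih => simp [List.foldl_cons, ih]

lemma getD_foldl_modify_append {α : Type} (L : List Int) (f : Int → Nat) (g : Int → α)
    (B : List (List α)) (hf : ∀ i ∈ L, f i < B.length) (j : Nat) :
    (L.foldl (fun B i => B.modify (f i) (fun l => l ++ [g i])) B).getD j []
      = B.getD j [] ++ (L.filter (fun i => decide (f i = j))).map g := by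
  induction L generalizing B with
  | nil => simp
  | cons x L ih =>
    have hx : f x < B.length := hf x (by simp)
    rw [List.foldl_cons, ih _ (by
      intro i hi
      simpa using hf i (List.mem_cons_of_mem _ hi))]
    by_cases hxj : f x = j
    · subst hxj
      have hmod : (B.modify (f x) (fun l => l ++ [g x])).getD (f x) []
          = B.getD (f x) [] ++ [g x] := by
        simp [List.getD, List.getElem?_eq_getElem hx]
      rw [hmod]
      simp [List.append_assoc]
    · have hmod : (B.modify (f x) (fun l => l ++ [g x])).getD j [] = B.getD j [] := by
        simp [List.getD, hxj]
      rw [hmod]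
      simp [hxj]

lemma rows_eq (cod : List (List Char)) {k : Nat}
    (fN : Int → Nat) (destZ : Int → Int) (hfk : ∀ i, fN i < k)
    (hdz : ∀ i, destZ i = ((fN i : Nat) : Int)) :
    String.ofList ((((PySem.List.pyRange (k : Int) (cod.length : Int) 1).foldl
        (fun B i => B.modify (fN i) (fun l => l ++ [PySem.List.pyGetD cod i []]))
        ((List.range k).map (fun (j : Nat) => [PySem.List.pyGetD cod (j : Int) []]))).map
          List.flatten).flatten)
      = String.ofList (((PySem.List.pyRange 0 (k : Int) 1).map (fun r =>
          PySem.List.pyGetD cod r [] ++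
            (((PySem.List.pyRange (k : Int) (cod.length : Int) 1).filter
                (fun i => decide (destZ i = r))).map
              (fun i => PySem.List.pyGetD cod i [])).flatten)).flatten) := by
  simp only [hdz]
  refine congrArg String.ofList (congrArg List.flatten ?_)
  apply List.ext_getElem
  · simp [length_foldl_modify, PySem.List.length_pyRange_one]
  · intro j h1 h2
    have hjk : j < k := by
      rw [List.length_map, length_foldl_modify] at h1
      simpa using h1
    rw [List.getElem_map, List.getElem_map]
    have hbj : ((PySem.List.pyRange (k : Int) (cod.length : Int) 1).foldl
        (fun B i => B.modify (fN i) (fun l => l ++ [PySem.List.pyGetD cod i []]))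
        ((List.range k).map (fun (j : Nat) => [PySem.List.pyGetD cod (j : Int) []])))[j]'(by
          rw [length_foldl_modify]; simpa using hjk)
        = ((List.range k).map (fun (j : Nat) => [PySem.List.pyGetD cod (j : Int) []])).getD j []
          ++ ((PySem.List.pyRange (k : Int) (cod.length : Int) 1).filter
                (fun i => decide (fN i = j))).map (fun i => PySem.List.pyGetD cod i []) := by
      rw [← List.getD_eq_getElem _ []]
      exact getD_foldl_modify_append _ fN (fun i => PySem.List.pyGetD cod i [])
        ((List.range k).map (fun (j : Nat) => [PySem.List.pyGetD cod (j : Int) []]))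
        (by intro i _; simpa using hfk i) j
    rw [hbj]
    have hinit : ((List.range k).map (fun (j : Nat) => [PySem.List.pyGetD cod (j : Int) []])).getD j []
        = [PySem.List.pyGetD cod (j : Int) []] := by
      rw [List.getD_eq_getElem _ [] (by simpa using hjk), List.getElem_map, List.getElem_range]
    rw [hinit]
    simp [PySem.List.getElem_pyRange_one, Nat.cast_inj]

-- ===== VERDICT (by name: the statement is the Claim_ definition above) =====
set_option maxHeartbeats 1600000 in
theorem rearanjare_cod_spec : Claim_equal_rearanjare_cod := by
  intro s v hdom hpre
  unfold Spec_rearanjare_cod rearanjare_cod rearanjare_cod_alt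
  by_cases h12 : v = 1 ∨ v = 2
  · simp [h12]
  · rw [if_neg h12, if_neg h12]
    have hmod2 : ∀ i : Int, (PySem.Int.mod i 2).toNat < 2 := by
      intro i
      have ha := PySem.Int.mod_nonneg (a := i) (b := 2) (by norm_num)
      have hb := PySem.Int.mod_lt (a := i) (b := 2) (by norm_num)
      omega
    have hmod4 : ∀ i : Int, (PySem.Int.mod i 4).toNat < 4 := by
      intro i
      have ha := PySem.Int.mod_nonneg (a := i) (b := 4) (by norm_num)
      have hb := PySem.Int.mod_lt (a := i) (b := 4) (by norm_num)
      omega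
    have hmodc2 : ∀ i : Int, PySem.Int.mod i 2 = (((PySem.Int.mod i 2).toNat : Nat) : Int) := by
      intro i
      have ha := PySem.Int.mod_nonneg (a := i) (b := 2) (by norm_num)
      omega
    have hmodc4 : ∀ i : Int, PySem.Int.mod i 4 = (((PySem.Int.mod i 4).toNat : Nat) : Int) := by
      intro i
      have ha := PySem.Int.mod_nonneg (a := i) (b := 4) (by norm_num)
      omega
    by_cases h3 : v = 3
    · subst h3
      have h := rows_eq (k := 2)
        ((PySem.List.pyRange 0 (s.toList.length : Int) 8).map
          (fun i => PySem.List.slice s.toList (some i) (some (i + 8))))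
        (fun i => (PySem.Int.mod i 2).toNat) (fun i => PySem.Int.mod i 2) hmod2
        (by intro i; exact hmodc2 i)
      simp only [List.range_succ, List.range_zero, List.map_cons, List.map_nil,
        Nat.cast_zero, Nat.cast_one, List.nil_append, List.cons_append] at h
      norm_num at h ⊢
      exact h
    · by_cases h46 : v = 4 ∨ v = 6
      · have h := rows_eq (k := 4)
          ((PySem.List.pyRange 0 (s.toList.length : Int) 8).map
            (fun i => PySem.List.slice s.toList (some i) (some (i + 8))))
          (fun i => (PySem.Int.mod i 4).toNat) (fun i => PySem.Int.mod i 4) hmod4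
          (by intro i; exact hmodc4 i)
        simp only [List.range_succ, List.range_zero, List.map_cons, List.map_nil,
          Nat.cast_zero, Nat.cast_one, Nat.cast_ofNat, List.nil_append, List.cons_append] at h
        rw [if_neg h3, if_pos h46]
        norm_num [h3, h46] at h ⊢
        exact h
      · have hfE : ∀ i : Int,
            (if i = 44 then (2:Nat) else if i = 45 then 3 else (PySem.Int.mod i 4).toNat) < 4 := by
          intro i
          split_ifs <;> first | omega | exact hmod4 i
        have h := rows_eq (k := 4)
          ((PySem.List.pyRange 0 (s.toList.length : Int) 8).map
            (fun i => PySem.List.slice s.toList (some i) (some (i + 8))))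
          (fun i => if i = 44 then 2 else if i = 45 then 3 else (PySem.Int.mod i 4).toNat)
          (fun i => if i = 44 then 2 else if i = 45 then 3 else PySem.Int.mod i 4) hfE
          (by
            intro i
            by_cases h44 : i = 44
            · simp [h44]
            · by_cases h45 : i = 45
              · simp [h45]
              · simp only [if_neg h44, if_neg h45]
                exact hmodc4 i)
        simp only [List.range_succ, List.range_zero, List.map_cons, List.map_nil,
          Nat.cast_zero, Nat.cast_one, Nat.cast_ofNat, List.nil_append, List.cons_append] at h
        rw [if_neg h3, if_neg h46]
        norm_num [h3, h46] at h ⊢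
        generalize hC : (PySem.List.pyRange 0 ((s.length : Int)) 8).map
            (fun i => PySem.List.slice s.toList (some i) (some (i + 8))) = C at h ⊢
        have hfun : (fun (B : List (List (List Char))) (i : Int) =>
            if i = 44 then B.modify 2 (fun linie => linie ++ [PySem.List.pyGetD C i []])
            else if i = 45 then B.modify 3 (fun linie => linie ++ [PySem.List.pyGetD C i []])
            else B.modify (i % 4).toNat (fun linie => linie ++ [PySem.List.pyGetD C i []]))
            = (fun B i => B.modify (if i = 44 then 2 else if i = 45 then 3 else (i % 4).toNat)
              (fun linie => linie ++ [PySem.List.pyGetD C i []])) := by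
          funext B i
          by_cases h44 : i = 44
          · simp [h44]
          · by_cases h45 : i = 45 <;> simp [h44, h45]
        rw [hfun]
        exact h
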